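-- pv_equiv track=rewrite | github.com/Bearkawq/Karma | core/symbolic.py | _fix_typos
-- ===== SOURCE A (Python) =====
-- def _levenshtein(a: str, b: str) -> int:
--     """Compute Levenshtein edit distance between two strings."""
--     if len(a) < len(b):
--         return _levenshtein(b, a)
--     if not b:
--         return len(a)
--     prev = list(range(len(b) + 1))
--     for i, ca in enumerate(a):
--         curr = [i + 1]
--         for j, cb in enumerate(b):
--             curr.append(min(prev[j + 1] + 1, curr[j] + 1, prev[j] + (ca != cb)))
--         prev = curr
--     return prev[-1]
--
-- _COMMAND_WORDS = {
--     "list": "list", "show": "show", "read": "read", "find": "find",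
--     "search": "search", "run": "run", "execute": "execute", "create": "create",
--     "delete": "delete", "remove": "remove", "teach": "teach", "forget": "forget",
--     "golearn": "golearn", "reload": "reload",
-- }
--
-- def _fix_typos(text: str) -> str:
--     """Try to correct misspelled command words using edit distance."""
--     words = text.split()
--     changed = False
--     for i, word in enumerate(words):
--         if i > 0:
--             break  # only correct the command word (always first)
--         low = word.lower()
--         if low in _COMMAND_WORDS:
--             continue  # already correct
--         # Only check short-ish words (command words are short)
--         if len(low) > 12 or len(low) < 3:
--             continue
--         best_match = None
--         best_dist = 2  # max 2 edits tolerated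
--         for cmd in _COMMAND_WORDS:
--             d = _levenshtein(low, cmd)
--             if d <= best_dist and d > 0 and d <= len(cmd) // 2:
--                 best_dist = d
--                 best_match = cmd
--         if best_match:
--             words[i] = best_match
--             changed = True
--     return " ".join(words) if changed else text
-- ===== SOURCE B (Python) =====
-- _COMMAND_WORDS = {
--     "list": "list", "show": "show", "read": "read", "find": "find",
--     "search": "search", "run": "run", "execute": "execute", "create": "create",
--     "delete": "delete", "remove": "remove", "teach": "teach", "forget": "forget",
--     "golearn": "golearn", "reload": "reload",
-- }
--
-- def _levenshtein(a: str, b: str) -> int: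
--     """Top-down memoized edit distance on prefix lengths (i, j)."""
--     memo = {}
--     def go(i, j):
--         if i == 0:
--             return j
--         if j == 0:
--             return i
--         v = memo.get((i, j))
--         if v is None:
--             cost = 0 if a[i - 1] == b[j - 1] else 1
--             v = min(go(i - 1, j) + 1, go(i, j - 1) + 1, go(i - 1, j - 1) + cost)
--             memo[(i, j)] = v
--         return v
--     return go(len(a), len(b))
--
-- def _fix_typos(text: str) -> str:
--     """Correct a misspelled first command word via edit distance."""
--     words = text.split()
--     if not words:
--         return text
--     low = words[0].lower()
--     if low in _COMMAND_WORDS or not (3 <= len(low) <= 12):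
--         return text
--     best = None
--     best_dist = 2
--     for cmd in _COMMAND_WORDS:
--         d = _levenshtein(low, cmd)
--         if 0 < d <= best_dist and d <= len(cmd) // 2:
--             best_dist = d
--             best = cmd
--     if best is None:
--         return text
--     return " ".join([best] + words[1:])
-- ===== Notes on version B (the rewrite author's own statement) =====
-- stated objective: alternative
-- what changed: The bottom-up two-row DP Levenshtein with an argument swap is replaced by a top-down memoized recursion on prefix lengths (no swap needed), and the degenerate for-loop over words with an immediate break is flattened into direct handling of the first word.
import Mathlib
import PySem

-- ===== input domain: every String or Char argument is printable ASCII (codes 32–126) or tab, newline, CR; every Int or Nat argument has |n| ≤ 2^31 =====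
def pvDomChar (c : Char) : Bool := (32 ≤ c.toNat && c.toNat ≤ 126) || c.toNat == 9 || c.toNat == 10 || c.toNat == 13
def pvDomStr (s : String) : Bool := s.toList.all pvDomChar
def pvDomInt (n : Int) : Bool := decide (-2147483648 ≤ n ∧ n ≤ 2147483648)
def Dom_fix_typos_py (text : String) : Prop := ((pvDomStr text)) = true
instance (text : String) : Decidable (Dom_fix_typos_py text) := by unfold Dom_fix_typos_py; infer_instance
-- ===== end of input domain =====

-- B replaces A's bottom-up two-row DP (with argument swap) by a top-down memoized
-- recursion on prefix lengths and flattens the break-at-index-1 loop; same results.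

-- _COMMAND_WORDS maps every key to itself; only its keys are ever read
-- (membership test, iteration, and the replacement word), shared by both ports.
def pvCommandWords : PySem.Dict String String := PySem.Dict.ofList
  [("list", "list"), ("show", "show"), ("read", "read"), ("find", "find"),
   ("search", "search"), ("run", "run"), ("execute", "execute"), ("create", "create"),
   ("delete", "delete"), ("remove", "remove"), ("teach", "teach"), ("forget", "forget"),
   ("golearn", "golearn"), ("reload", "reload")]

-- ===== PORT A =====
-- inner `for j, cb in enumerate(b): curr.append(min(...))`
def pvRowA (prev : List Nat) (ca : Char) : Nat → List Char → List Nat → List Nat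
  | _, [], curr => curr
  | j, cb :: bs, curr =>
      pvRowA prev ca (j + 1) bs
        (curr ++ [min (min (prev.getD (j + 1) 0 + 1) (curr.getD j 0 + 1))
                      (prev.getD j 0 + (if ca ≠ cb then 1 else 0))])

-- outer `for i, ca in enumerate(a): ... prev = curr`
def pvDPA (b : List Char) : Nat → List Char → List Nat → List Nat
  | _, [], prev => prev
  | i, ca :: as', prev => pvDPA b (i + 1) as' (pvRowA prev ca 0 b [i + 1])

-- `_levenshtein` (on the char sequences of the two strings)
def pvLevA (a b : List Char) : Nat :=
  if _h : a.length < b.length then pvLevA b a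
  else if b.isEmpty then a.length
  else PySem.List.pyGetD (pvDPA b 0 a (List.range (b.length + 1))) (-1) 0
termination_by b.length - a.length
decreasing_by omega

-- inner `for cmd in _COMMAND_WORDS:` selection loop (state: best_match, best_dist)
def pvSelA (low : List Char) : List String → Option String → Nat → Option String × Nat
  | [], best, bd => (best, bd)
  | cmd :: rest, best, bd =>
      let d := pvLevA low cmd.toList
      if d ≤ bd ∧ 0 < d ∧ d ≤ cmd.toList.length / 2 then pvSelA low rest (some cmd) d
      else pvSelA low rest best bd

-- `for i, word in enumerate(words):` with `if i > 0: break`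
def pvFixLoopA : Nat → List String → List String → Bool → List String × Bool
  | _, [], words, changed => (words, changed)
  | i, word :: rest, words, changed =>
    if 0 < i then (words, changed)
    else
      let low := PySem.Str.lower word
      if pvCommandWords.contains low then pvFixLoopA (i + 1) rest words changed
      else if 12 < PySem.Str.len low ∨ PySem.Str.len low < 3 then
        pvFixLoopA (i + 1) rest words changed
      else
        match (pvSelA low.toList (PySem.Dict.keys pvCommandWords) none 2).1 with
        | some m => pvFixLoopA (i + 1) rest (words.set i m) true
        | none => pvFixLoopA (i + 1) rest words changed

def fix_typos_py (text : String) : String :=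
  let words := PySem.Str.split₀ text
  let r := pvFixLoopA 0 words words false
  if r.2 then PySem.Str.join " " r.1 else text

-- ===== PORT B =====
-- memoized `go(i, j)` of Source B; the memo dict is threaded through the recursion
def pvLevBGo (a b : List Char) : Nat → Nat → PySem.Dict (Nat × Nat) Nat → Nat × PySem.Dict (Nat × Nat) Nat
  | 0, j, memo => (j, memo)
  | i + 1, 0, memo => (i + 1, memo)
  | i + 1, j + 1, memo =>
    match memo.get? (i + 1, j + 1) with
    | some v => (v, memo)
    | none =>
      let cost : Nat := if a.getD i ' ' = b.getD j ' ' then 0 else 1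
      let x := pvLevBGo a b i (j + 1) memo
      let y := pvLevBGo a b (i + 1) j x.2
      let z := pvLevBGo a b i j y.2
      let v := min (min (x.1 + 1) (y.1 + 1)) (z.1 + cost)
      (v, z.2.insert (i + 1, j + 1) v)
termination_by i j _ => (i, j)

def pvLevB (a b : List Char) : Nat :=
  (pvLevBGo a b a.length b.length PySem.Dict.empty).1

def pvSelB (low : List Char) : List String → Option String → Nat → Option String × Nat
  | [], best, bd => (best, bd)
  | cmd :: rest, best, bd =>
      let d := pvLevB low cmd.toList
      if 0 < d ∧ d ≤ bd ∧ d ≤ cmd.toList.length / 2 then pvSelB low rest (some cmd) d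
      else pvSelB low rest best bd

def fix_typos_py_alt (text : String) : String :=
  match PySem.Str.split₀ text with
  | [] => text
  | w :: rest =>
    let low := PySem.Str.lower w
    if pvCommandWords.contains low ∨ ¬ (3 ≤ PySem.Str.len low ∧ PySem.Str.len low ≤ 12) then text
    else
      match (pvSelB low.toList (PySem.Dict.keys pvCommandWords) none 2).1 with
      | some cmd => PySem.Str.join " " (cmd :: rest)
      | none => text

-- ===== PRECONDITION & SPEC =====
def Spec_fix_typos_py (text : String) (out : String) : Prop := out = fix_typos_py_alt text
instance (text : String) (out : String) : Decidable (Spec_fix_typos_py text out) := by unfold Spec_fix_typos_py; infer_instance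

-- ===== CLAIM (what is proved, stated in full; the proofs are below) =====
def Claim_equal_fix_typos_py : Prop := ∀ (text : String), Dom_fix_typos_py text → Spec_fix_typos_py text (fix_typos_py text)

-- ===== LEMMAS AND PROOFS =====

-- pure specification of the Levenshtein recursion on prefix lengths (proof-side only)
def pvL (a b : List Char) : Nat → Nat → Nat
  | 0, j => j
  | i + 1, 0 => i + 1
  | i + 1, j + 1 =>
      min (min (pvL a b i (j + 1) + 1) (pvL a b (i + 1) j + 1))
          (pvL a b i j + (if a.getD i ' ' = b.getD j ' ' then 0 else 1))
termination_by i j => (i, j)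

theorem pvL_right_zero (a b : List Char) (i : Nat) : pvL a b i 0 = i := by
  cases i <;> simp [pvL]

theorem pvL_zero_left (a b : List Char) (j : Nat) : pvL a b 0 j = j := by simp [pvL]

-- the memo is valid: every stored value is the spec value
def pvValid (a b : List Char) (m : PySem.Dict (Nat × Nat) Nat) : Prop :=
  ∀ p v, m.get? p = some v → v = pvL a b p.1 p.2

theorem pvLevBGo_correct (a b : List Char) :
    ∀ n i j m, i + j ≤ n → pvValid a b m →
      (pvLevBGo a b i j m).1 = pvL a b i j ∧ pvValid a b (pvLevBGo a b i j m).2 := by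
  intro n
  induction n with
  | zero =>
    intro i j m h hv
    match i, j with
    | 0, 0 => exact ⟨by simp [pvLevBGo, pvL], by simpa [pvLevBGo] using hv⟩
    | 0, j + 1 => exact absurd h (by omega)
    | i + 1, j => exact absurd h (by omega)
  | succ n ih =>
    intro i j m h hv
    match i, j with
    | 0, j => exact ⟨by simp [pvLevBGo, pvL], by simpa [pvLevBGo] using hv⟩
    | i + 1, 0 => exact ⟨by simp [pvLevBGo, pvL], by simpa [pvLevBGo] using hv⟩
    | i + 1, j + 1 =>
      rw [pvLevBGo]
      cases hm : m.get? (i + 1, j + 1) with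
      | some v => exact ⟨hv _ _ hm, hv⟩
      | none =>
        obtain ⟨hx1, hx2⟩ := ih i (j + 1) m (by omega) hv
        obtain ⟨hy1, hy2⟩ := ih (i + 1) j _ (by omega) hx2
        obtain ⟨hz1, hz2⟩ := ih i j _ (by omega) hy2
        simp only
        constructor
        · rw [pvL]; rw [hx1, hy1, hz1]
        · intro p v hget
          rw [PySem.Dict.get?_insert] at hget
          split at hget
          · rename_i hp; cases hget; subst hp
            simp only; rw [pvL, hx1, hy1, hz1]
          · exact hz2 _ _ hget

theorem pvLevB_eq (a b : List Char) : pvLevB a b = pvL a b a.length b.length := by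
  exact (pvLevBGo_correct a b (a.length + b.length) a.length b.length PySem.Dict.empty
    le_rfl (fun p v h => by simp [PySem.Dict.get?_empty] at h)).1

theorem pvL_symm (a b : List Char) : ∀ n i j, i + j ≤ n → pvL a b i j = pvL b a j i := by
  intro n
  induction n with
  | zero =>
    intro i j h
    match i, j with
    | 0, 0 => simp [pvL]
    | 0, j + 1 => exact absurd h (by omega)
    | i + 1, j => exact absurd h (by omega)
  | succ n ih =>
    intro i j h
    match i, j with
    | 0, j => rw [pvL_zero_left, pvL_right_zero]
    | i + 1, 0 => rw [pvL_zero_left, pvL_right_zero]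
    | i + 1, j + 1 =>
      rw [pvL, pvL]
      rw [ih i (j + 1) (by omega), ih (i + 1) j (by omega), ih i j (by omega)]
      by_cases hc : a.getD i ' ' = b.getD j ' '
      · rw [if_pos hc, if_pos hc.symm]; omega
      · rw [if_neg hc, if_neg (fun h' => hc h'.symm)]; omega

theorem pvRowA_eq (a b : List Char) (i : Nat) (_hi : i < a.length) (prev : List Nat)
    (hprev : prev = (List.range (b.length + 1)).map (pvL a b i)) :
    ∀ bs j curr, b.drop j = bs → j ≤ b.length →
      curr = (List.range (j + 1)).map (pvL a b (i + 1)) →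
      pvRowA prev (a.getD i ' ') j bs curr = (List.range (b.length + 1)).map (pvL a b (i + 1)) := by
  intro bs
  induction bs with
  | nil =>
    intro j curr hdrop hj hcurr
    have hj' : b.length ≤ j := List.drop_eq_nil_iff.mp hdrop
    have : j = b.length := by omega
    subst this
    simpa [pvRowA] using hcurr
  | cons cb bs' ih =>
    intro j curr hdrop hj hcurr
    have hjlt : j < b.length := by
      have := congrArg List.length hdrop
      simp only [List.length_drop, List.length_cons] at this
      omega
    have hcb : b.getD j ' ' = cb := by
      have h0 : (b.drop j)[0]'(by rw [hdrop]; simp) = cb := by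
        simp [hdrop]
      rw [List.getElem_drop] at h0
      rw [List.getD_eq_getElem _ _ hjlt]
      simpa using h0
    rw [pvRowA]
    apply ih (j + 1)
    · rw [← List.tail_drop, hdrop]; rfl
    · omega
    · have hc1 : curr.getD j 0 = pvL a b (i + 1) j := by
        rw [hcurr]; exact PySem.List.getD_map_range _ _ _ _ (by omega)
      have hp1 : prev.getD (j + 1) 0 = pvL a b i (j + 1) := by
        rw [hprev]; exact PySem.List.getD_map_range _ _ _ _ (by omega)
      have hp0 : prev.getD j 0 = pvL a b i j := by
        rw [hprev]; exact PySem.List.getD_map_range _ _ _ _ (by omega)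
      rw [hc1, hp1, hp0,
          show (List.range (j + 1 + 1)).map (pvL a b (i + 1))
              = (List.range (j + 1)).map (pvL a b (i + 1)) ++ [pvL a b (i + 1) (j + 1)] from by
            rw [List.range_succ, List.map_append, List.map_singleton],
          hcurr]
      congr 1
      rw [pvL, hcb]
      by_cases hc : a.getD i ' ' = cb
      · rw [if_neg (not_not_intro hc), if_pos hc]
      · rw [if_pos hc, if_neg hc]

theorem pvDPA_eq (a b : List Char) :
    ∀ as' i prev, a.drop i = as' → i ≤ a.length →
      prev = (List.range (b.length + 1)).map (pvL a b i) →
      pvDPA b i as' prev = (List.range (b.length + 1)).map (pvL a b a.length) := by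
  intro as'
  induction as' with
  | nil =>
    intro i prev hdrop hi hprev
    have : a.length ≤ i := List.drop_eq_nil_iff.mp hdrop
    have : i = a.length := by omega
    subst this
    simpa [pvDPA] using hprev
  | cons ca rest ih =>
    intro i prev hdrop hi hprev
    have hilt : i < a.length := by
      have := congrArg List.length hdrop
      simp only [List.length_drop, List.length_cons] at this
      omega
    have hca : a.getD i ' ' = ca := by
      have h0 : (a.drop i)[0]'(by rw [hdrop]; simp) = ca := by simp [hdrop]
      rw [List.getElem_drop] at h0
      rw [List.getD_eq_getElem _ _ hilt]
      simpa using h0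
    rw [pvDPA]
    apply ih (i + 1)
    · rw [← List.tail_drop, hdrop]; rfl
    · omega
    · rw [← hca]
      exact pvRowA_eq a b i hilt prev hprev b 0 [i + 1] rfl (by omega)
        (by simp [List.range_one, pvL_right_zero])

theorem pvLevA_core (a b : List Char) (h : ¬ a.length < b.length) :
    pvLevA a b = pvL a b a.length b.length := by
  rw [pvLevA, dif_neg h]
  by_cases hb : b.isEmpty
  · rw [if_pos hb]
    rw [List.isEmpty_iff.mp hb]
    simp [pvL_right_zero]
  · rw [if_neg hb]
    rw [pvDPA_eq a b a 0 (List.range (b.length + 1)) rfl (by omega)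
      (by rw [List.map_congr_left fun j _ => pvL_zero_left a b j]; simp)]
    rw [List.range_succ, List.map_append, List.map_singleton,
        PySem.List.pyGetD_neg_one_append_singleton]

theorem pvLevA_eq (a b : List Char) : pvLevA a b = pvL a b a.length b.length := by
  by_cases h : a.length < b.length
  · rw [pvLevA]; rw [dif_pos h, pvLevA_core b a (by omega)]
    have := pvL_symm b a (a.length + b.length) b.length a.length (by omega)
    omega
  · exact pvLevA_core a b h

theorem pvSel_eq (low : List Char) :
    ∀ cmds best bd, pvSelA low cmds best bd = pvSelB low cmds best bd := by
  intro cmds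
  induction cmds with
  | nil => intro best bd; rfl
  | cons cmd rest ih =>
    intro best bd
    simp only [pvSelA, pvSelB, pvLevA_eq, pvLevB_eq]
    split_ifs with h1 h2 h2 <;> first | exact ih _ _ | (exfalso; tauto)

theorem pvFixLoopA_pos : ∀ (ws : List String) (i : Nat) (words : List String) (changed : Bool),
    0 < i → pvFixLoopA i ws words changed = (words, changed) := by
  intro ws i words changed h
  cases ws with
  | nil => rfl
  | cons w rest => simp [pvFixLoopA, h]

-- ===== VERDICT (by name: the statement is the Claim_ definition above) =====
theorem fix_typos_py_spec : Claim_equal_fix_typos_py := by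
  intro text _
  unfold Spec_fix_typos_py fix_typos_py fix_typos_py_alt
  cases hsplit : PySem.Str.split₀ text with
  | nil => simp [pvFixLoopA]
  | cons w rest =>
    dsimp only
    rw [pvFixLoopA, if_neg (by omega : ¬ (0:Nat) < 0)]
    by_cases hc : pvCommandWords.contains (PySem.Str.lower w) = true
    · rw [if_pos hc]
      simp [pvFixLoopA_pos, hc]
    · rw [if_neg hc]
      by_cases hlen : 3 ≤ (PySem.Chars.lower w.toList).length ∧ (PySem.Chars.lower w.toList).length ≤ 12
      · have hA : ¬ (12 < PySem.Str.len (PySem.Str.lower w) ∨ PySem.Str.len (PySem.Str.lower w) < 3) := by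
          simp only [PySem.Str.len_eq, PySem.Str.toList_lower]
          omega
        rw [if_neg hA, pvSel_eq]
        cases hsel : (pvSelB (PySem.Str.lower w).toList (PySem.Dict.keys pvCommandWords) none 2).1 with
        | some m =>
          rw [show (PySem.Str.lower w).toList = PySem.Chars.lower w.toList from
            PySem.Str.toList_lower w] at hsel
          simp [pvFixLoopA_pos, hc, hlen.1, hlen.2]
        | none =>
          rw [show (PySem.Str.lower w).toList = PySem.Chars.lower w.toList from
            PySem.Str.toList_lower w] at hsel
          simp [pvFixLoopA_pos, hc, hlen.1, hlen.2]
      · have hA : 12 < PySem.Str.len (PySem.Str.lower w) ∨ PySem.Str.len (PySem.Str.lower w) < 3 := by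
          simp only [PySem.Str.len_eq, PySem.Str.toList_lower]
          omega
        rw [if_pos hA]
        simp only [pvFixLoopA_pos _ _ _ _ (Nat.succ_pos 0)]
        simp only [Bool.false_eq_true, if_false]
        rw [if_pos (Or.inr (by simpa using hlen))]
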